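-- pv_equiv track=rewrite | github.com/AlexanderOnischenko/fetchgraph | src/fetchgraph/core/context.py | _limit_sections
-- ===== SOURCE A (Python) =====
-- from typing import Any, Dict, List, Optional, Callable
--
-- def _limit_sections(sections: List[List[str]], limit: int) -> List[str]:
--     acc: List[str] = []
--     for sec in sections:
--         if not sec:
--             continue
--         candidate = acc + sec
--         if len("\n".join(candidate)) > limit:
--             break
--         acc = candidate
--     return acc
-- ===== SOURCE B (Python) =====
-- from typing import Any, Dict, List, Optional, Callable
--
-- def _limit_sections(sections: List[List[str]], limit: int) -> List[str]:
--     secs = [s for s in sections if s]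
--     # prefix[k] = total chars + element count of the first k non-empty sections;
--     # the "\n".join length of those sections' elements is prefix[k] - 1 (0 for k = 0).
--     prefix = [0]
--     for s in secs:
--         prefix.append(prefix[-1] + sum(len(x) for x in s) + len(s))
--     # binary search for the largest k with joined length <= limit (prefix is strictly increasing)
--     lo, hi = 0, len(secs)
--     while lo < hi:
--         mid = (lo + hi + 1) // 2
--         if prefix[mid] - 1 <= limit:
--             lo = mid
--         else:
--             hi = mid - 1
--     return [x for s in secs[:lo] for x in s]
-- ===== Notes on version B (the rewrite author's own statement) =====
-- stated objective: alternative
-- what changed: Replaces the greedy loop that re-joins the whole accumulated list with "\n" on every section by a filter + prefix-length table (joined length of the first k non-empty sections = chars+elements prefix sum minus 1) searched with a hand-written binary search, then a single flatten.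
import Mathlib
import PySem

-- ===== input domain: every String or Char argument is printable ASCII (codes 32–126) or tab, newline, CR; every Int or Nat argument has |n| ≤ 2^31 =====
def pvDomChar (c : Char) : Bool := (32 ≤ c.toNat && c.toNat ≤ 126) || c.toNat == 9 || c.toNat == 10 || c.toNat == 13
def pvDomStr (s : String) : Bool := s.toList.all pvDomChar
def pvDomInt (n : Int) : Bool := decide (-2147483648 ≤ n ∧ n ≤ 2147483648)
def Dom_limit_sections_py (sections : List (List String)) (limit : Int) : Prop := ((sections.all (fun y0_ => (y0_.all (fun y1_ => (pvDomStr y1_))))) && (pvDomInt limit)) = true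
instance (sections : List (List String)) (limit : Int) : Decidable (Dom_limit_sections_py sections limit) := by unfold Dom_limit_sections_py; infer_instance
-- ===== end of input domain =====

-- B replaces A's greedy loop (which re-joins the whole accumulator with "\n" at every
-- section) by a filter + prefix-length table searched with a binary search (alternative
-- algorithm; not measurably faster on a timing run's inputs).

-- ===== PORT A =====
-- the for-loop of _limit_sections: state is acc; 'continue' on empty sec, 'break' returns acc
def limit_sections_py_go (limit : Int) (acc : List String) : List (List String) → List String
  | [] => acc
  | sec :: rest =>
    if sec.isEmpty then limit_sections_py_go limit acc rest
    else
      let candidate := acc ++ sec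
      if limit < PySem.Str.len (PySem.Str.join "\n" candidate) then acc
      else limit_sections_py_go limit candidate rest

def limit_sections_py (sections : List (List String)) (limit : Int) : List String :=
  limit_sections_py_go limit [] sections

-- ===== PORT B =====
-- sum(len(x) for x in s) + len(s)
def pvCost (s : List String) : Int := (s.map PySem.Str.len).sum + PySem.List.len s

-- the prefix-building loop of Source B: carries prefix[-1] as the accumulator 'last'
def pvPrefix (last : Int) : List (List String) → List Int
  | [] => []
  | s :: r => let v := last + pvCost s; v :: pvPrefix v r

-- the hand-written while-loop binary search of Source B
def pvBsearch (pre : List Int) (limit : Int) (lo hi : Nat) : Nat :=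
  if h : lo < hi then
    let mid := (lo + hi + 1) / 2
    if pre.getD mid 0 - 1 ≤ limit then pvBsearch pre limit mid hi
    else pvBsearch pre limit lo (mid - 1)
  else lo
termination_by hi - lo
decreasing_by all_goals omega

def limit_sections_py_alt (sections : List (List String)) (limit : Int) : List String :=
  let secs := sections.filter (fun s => !s.isEmpty)
  let pre := 0 :: pvPrefix 0 secs
  let lo := pvBsearch pre limit 0 secs.length
  (secs.take lo).flatten

-- ===== PRECONDITION & SPEC =====
def Spec_limit_sections_py (sections : List (List String)) (limit : Int) (out : List String) : Prop := out = limit_sections_py_alt sections limit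
instance (sections : List (List String)) (limit : Int) (out : List String) : Decidable (Spec_limit_sections_py sections limit out) := by unfold Spec_limit_sections_py; infer_instance

-- ===== CLAIM (what is proved, stated in full; the proofs are below) =====
def Claim_equal_limit_sections_py : Prop := ∀ (sections : List (List String)) (limit : Int), Dom_limit_sections_py sections limit → Spec_limit_sections_py sections limit (limit_sections_py sections limit)

-- ===== LEMMAS AND PROOFS =====

-- A's loop ignores empty sections: it equals itself on the filtered list
theorem pv_go_filter (limit : Int) (l : List (List String)) (acc : List String) :
    limit_sections_py_go limit acc l = limit_sections_py_go limit acc (l.filter (fun s => !s.isEmpty)) := by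
  induction l generalizing acc with
  | nil => rfl
  | cons s r ih =>
    cases hs : s.isEmpty with
    | true => simp only [limit_sections_py_go, hs, if_true, List.filter_cons, Bool.not_true,
        Bool.false_eq_true, if_false]; exact ih acc
    | false =>
      simp only [limit_sections_py_go, hs, Bool.false_eq_true, if_false, List.filter_cons,
        Bool.not_false, if_true]
      split
      · rfl
      · exact ih _

-- length of "\n".join(l) for nonempty l
theorem pv_join_len (l : List String) (h : l ≠ []) :
    PySem.Str.len (PySem.Str.join "\n" l) = (l.map PySem.Str.len).sum + l.length - 1 := by
  induction l with
  | nil => exact absurd rfl h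
  | cons p rest ih =>
    cases rest with
    | nil =>
      simp [PySem.Str.len_eq, PySem.Str.toList_join, PySem.Chars.join, List.intercalate]
    | cons q rr =>
      have hih := ih (by simp)
      have hsep : ("\n".toList).length = 1 := rfl
      simp only [PySem.Str.len_eq, PySem.Str.toList_join, List.map_cons] at hih ⊢
      rw [PySem.Chars.join_cons_cons]
      simp only [List.length_append, List.length_cons, List.sum_cons] at hih ⊢
      simp only [hsep]
      push_cast at hih ⊢
      omega

-- greedy count of sections accepted by A, with running prefix value c
def pvKC (limit c : Int) : List (List String) → Nat
  | [] => 0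
  | s :: r => if limit < c + pvCost s - 1 then 0 else pvKC limit (c + pvCost s) r + 1

theorem pv_kc_le (limit c : Int) (l : List (List String)) : pvKC limit c l ≤ l.length := by
  induction l generalizing c with
  | nil => simp [pvKC]
  | cons s r ih =>
    simp only [pvKC, List.length_cons]
    split
    · omega
    · exact Nat.succ_le_succ (ih _)

theorem pv_cost_pos (s : List String) (h : s ≠ []) : 1 ≤ pvCost s := by
  have h1 : 0 ≤ (s.map PySem.Str.len).sum := by
    apply List.sum_nonneg
    intro x hx
    obtain ⟨y, _, rfl⟩ := List.mem_map.1 hx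
    simp [PySem.Str.len_eq]
  have h2 : 1 ≤ s.length := by
    cases s with
    | nil => exact absurd rfl h
    | cons a b => simp
  simp only [pvCost, PySem.List.len_eq]
  omega

theorem pv_sum_take_ge (l : List Int) (h : ∀ x ∈ l, 1 ≤ x) (k : Nat) (hk : k ≤ l.length) :
    (k : Int) ≤ (l.take k).sum := by
  induction l generalizing k with
  | nil => simp at hk; simp [hk]
  | cons a r ih =>
    cases k with
    | zero => simp
    | succ k' =>
      have ha := h a (List.mem_cons_self ..)
      have := ih (fun x hx => h x (List.mem_cons_of_mem _ hx)) k' (by simp at hk; omega)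
      simp only [List.take_succ_cons, List.sum_cons]
      push_cast
      omega

theorem pv_go_eq (limit : Int) (l : List (List String)) (h : ∀ s ∈ l, s ≠ [])
    (acc : List String) (c : Int) (hc : c = (acc.map PySem.Str.len).sum + acc.length) :
    limit_sections_py_go limit acc l = acc ++ (l.take (pvKC limit c l)).flatten := by
  induction l generalizing acc c with
  | nil => simp [limit_sections_py_go, pvKC]
  | cons s r ih =>
    have hs : s ≠ [] := h s (List.mem_cons_self ..)
    have hse : s.isEmpty = false := by simpa [List.isEmpty_iff] using hs
    have hcand : acc ++ s ≠ [] := by simp [hs]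
    have hlen : PySem.Str.len (PySem.Str.join "\n" (acc ++ s)) = c + pvCost s - 1 := by
      rw [pv_join_len _ hcand]
      simp only [List.map_append, List.sum_append, List.length_append, pvCost,
        PySem.List.len_eq, hc]
      push_cast
      ring
    simp only [limit_sections_py_go, hse, Bool.false_eq_true, if_false, hlen, pvKC]
    split
    · simp
    · rw [ih (fun t ht => h t (List.mem_cons_of_mem _ ht)) (acc ++ s) (c + pvCost s)
        (by simp only [List.map_append, List.sum_append, List.length_append, pvCost,
              PySem.List.len_eq, hc]; push_cast; ring)]
      simp [List.take_succ_cons]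

theorem pv_prefix_getD (l : List (List String)) (c : Int) (k : Nat) (hk : k ≤ l.length) :
    (c :: pvPrefix c l).getD k 0 = c + ((l.map pvCost).take k).sum := by
  induction l generalizing c k with
  | nil => simp at hk; simp [hk]
  | cons s r ih =>
    cases k with
    | zero => simp
    | succ k' =>
      have hrec := ih (c + pvCost s) k' (by simp at hk; omega)
      have hgd : (c :: pvPrefix c (s :: r)).getD (k' + 1) 0
          = ((c + pvCost s) :: pvPrefix (c + pvCost s) r).getD k' 0 := by
        simp [pvPrefix]
      rw [hgd, hrec]
      simp only [List.map_cons, List.take_succ_cons, List.sum_cons]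
      ring

theorem pv_kc_iff (limit : Int) (l : List (List String)) (h : ∀ s ∈ l, s ≠ []) (c : Int)
    (k : Nat) (h1 : 1 ≤ k) (hk : k ≤ l.length) :
    (c + ((l.map pvCost).take k).sum - 1 ≤ limit ↔ k ≤ pvKC limit c l) := by
  induction l generalizing c k with
  | nil => simp at hk; omega
  | cons s r ih =>
    have hs := pv_cost_pos s (h s (List.mem_cons_self ..))
    cases k with
    | zero => omega
    | succ k' =>
      simp only [List.map_cons, List.take_succ_cons, List.sum_cons, pvKC]
      cases Nat.eq_zero_or_pos k' with
      | inl hz =>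
        subst hz
        simp only [List.take_zero, List.sum_nil, add_zero]
        split
        · rename_i hgt
          constructor
          · intro hle; omega
          · intro hle; omega
        · rename_i hgt
          constructor
          · intro hle; omega
          · intro hle; omega
      | inr hp =>
        have hsum : (k' : Int) ≤ ((r.map pvCost).take k').sum := by
          apply pv_sum_take_ge
          · intro x hx
            obtain ⟨y, hy, rfl⟩ := List.mem_map.1 hx
            exact pv_cost_pos y (h y (List.mem_cons_of_mem _ hy))
          · simp at hk ⊢; omega
        have hrec := ih (fun t ht => h t (List.mem_cons_of_mem _ ht)) (c + pvCost s) k' hp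
          (by simp at hk; omega)
        split
        · rename_i hgt
          constructor
          · intro hle; exfalso; omega
          · intro hle; omega
        · rename_i hgt
          constructor
          · intro hle
            have hx : k' ≤ pvKC limit (c + pvCost s) r := hrec.1 (by omega)
            omega
          · intro hle
            have hx : k' ≤ pvKC limit (c + pvCost s) r := by omega
            have := hrec.2 hx
            omega

theorem pv_bsearch_eq (pre : List Int) (limit : Int) (n K : Nat)
    (_hK : K ≤ n)
    (H : ∀ k, 1 ≤ k → k ≤ n → (pre.getD k 0 - 1 ≤ limit ↔ k ≤ K)) :
    ∀ lo hi, lo ≤ K → K ≤ hi → hi ≤ n → pvBsearch pre limit lo hi = K := by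
  intro lo hi
  induction hlh : hi - lo using Nat.strong_induction_on generalizing lo hi with
  | _ d ih =>
    intro hlo hhi hn
    rw [pvBsearch]
    by_cases h : lo < hi
    · rw [dif_pos h]
      have hmid1 : lo < (lo + hi + 1) / 2 := by omega
      have hmid2 : (lo + hi + 1) / 2 ≤ hi := by omega
      set mid := (lo + hi + 1) / 2 with hm
      have hiff := H mid (by omega) (by omega)
      by_cases hc : pre.getD mid 0 - 1 ≤ limit
      · rw [if_pos hc]
        exact ih (hi - mid) (by omega) mid hi rfl (hiff.1 hc) hhi hn
      · rw [if_neg hc]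
        have hKlt : ¬ mid ≤ K := fun hle => hc (hiff.2 hle)
        exact ih ((mid - 1) - lo) (by omega) lo (mid - 1) rfl hlo (by omega) (by omega)
    · rw [dif_neg h]
      omega

-- ===== VERDICT (by name: the statement is the Claim_ definition above) =====
theorem limit_sections_py_spec : Claim_equal_limit_sections_py := by
  intro sections limit _
  unfold Spec_limit_sections_py limit_sections_py
  have hne : ∀ s ∈ sections.filter (fun s => !s.isEmpty), s ≠ [] := by
    intro s hsz
    have := (List.mem_filter.1 hsz).2
    simpa [List.isEmpty_iff] using this
  have halt : limit_sections_py_alt sections limit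
      = ((sections.filter (fun s => !s.isEmpty)).take
          (pvBsearch (0 :: pvPrefix 0 (sections.filter (fun s => !s.isEmpty))) limit 0
            (sections.filter (fun s => !s.isEmpty)).length)).flatten := rfl
  have hB : pvBsearch (0 :: pvPrefix 0 (sections.filter (fun s => !s.isEmpty))) limit 0
      (sections.filter (fun s => !s.isEmpty)).length
      = pvKC limit 0 (sections.filter (fun s => !s.isEmpty)) := by
    refine pv_bsearch_eq _ _ _ _ (pv_kc_le limit 0 _) ?_ 0 _ (Nat.zero_le _)
      (pv_kc_le limit 0 _) le_rfl
    intro k h1 hk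
    rw [pv_prefix_getD _ 0 k hk]
    exact pv_kc_iff limit _ hne 0 k h1 hk
  rw [pv_go_filter, pv_go_eq limit _ hne [] 0 (by simp), halt, hB]
  simp
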